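-- pv_equiv track=rewrite | github.com/kiayria/epam-python-hw | homework01/task02/fibonacci/fib.py | check_fibonacci
-- ===== SOURCE A (Python) =====
-- from typing import Sequence
--
-- def check_fibonacci(data: Sequence[int]) -> bool:
--     data_length = len(data)
--     if data_length == 0:
--         return False
--     elif data_length == 1:
--         return data[0] == 0
--     elif data_length == 2:
--         return data[0] == 0 and data[1] == 1
--     else:
--         if data[0] == 0 and data[1] == 1:
--             for i in range(data_length - 2):
--                 if data[i + 2] != data[i] + data[i + 1] or data[i + 2] == 0:
--                     return False
--         else:
--             return False
--     return True
-- ===== SOURCE B (Python) =====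
-- def check_fibonacci(data):
--     if not data:
--         return False
--
--     def fib():
--         a, b = 0, 1
--         while True:
--             yield a
--             a, b = b, a + b
--
--     return all(x == y for x, y in zip(data, fib()))
-- ===== Notes on version B (the rewrite author's own statement) =====
-- stated objective: alternative
-- what changed: B drops A's length case-split and recurrence check on the data itself, and instead compares the input element-wise (zip + all) against a lazily generated canonical Fibonacci stream 0,1,1,2,3,...
import Mathlib
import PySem

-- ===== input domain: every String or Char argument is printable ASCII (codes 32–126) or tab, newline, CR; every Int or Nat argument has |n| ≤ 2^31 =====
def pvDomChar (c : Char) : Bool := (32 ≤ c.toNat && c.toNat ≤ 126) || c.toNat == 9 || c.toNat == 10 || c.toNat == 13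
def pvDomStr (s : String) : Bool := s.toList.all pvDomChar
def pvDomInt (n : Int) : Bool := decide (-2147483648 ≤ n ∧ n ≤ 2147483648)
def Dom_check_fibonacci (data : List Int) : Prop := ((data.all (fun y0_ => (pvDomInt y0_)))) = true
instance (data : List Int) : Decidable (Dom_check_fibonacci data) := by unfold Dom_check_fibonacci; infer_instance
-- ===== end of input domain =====

-- B compares the input element-wise against a lazily generated canonical Fibonacci stream,
-- instead of A's length case-split plus recurrence check on the data itself; alternative decomposition.

-- ===== PORT A =====
-- literal transliteration of A: length cases, then an index loop checking the recurrence
def check_fibonacci (data : List Int) : Bool :=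
  let n : Int := data.length
  if n == 0 then false
  else if n == 1 then PySem.List.pyGetD data 0 0 == 0
  else if n == 2 then PySem.List.pyGetD data 0 0 == 0 && PySem.List.pyGetD data 1 0 == 1
  else
    if PySem.List.pyGetD data 0 0 == 0 && PySem.List.pyGetD data 1 0 == 1 then
      (PySem.List.pyRange 0 (n - 2) 1).foldl
        (fun acc i =>
          acc && !(PySem.List.pyGetD data (i + 2) 0 != PySem.List.pyGetD data i 0 + PySem.List.pyGetD data (i + 1) 0
                   || PySem.List.pyGetD data (i + 2) 0 == 0))
        true
    else false

-- ===== PORT B =====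
-- Source B's 'zip(data, fib())' + all(x == y ...): the zip of the list with the generator, consumed
-- left to right with short-circuit, is exactly this recursion carrying the generator state (a, b)
def fibAll (xs : List Int) (a b : Int) : Bool :=
  match xs with
  | [] => true
  | x :: rest => x == a && fibAll rest b (a + b)

def check_fibonacci_alt (data : List Int) : Bool :=
  if data.isEmpty then false else fibAll data 0 1

-- ===== PRECONDITION & SPEC =====
def Spec_check_fibonacci (data : List Int) (out : Bool) : Prop := out = check_fibonacci_alt data
instance (data : List Int) (out : Bool) : Decidable (Spec_check_fibonacci data out) := by unfold Spec_check_fibonacci; infer_instance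

-- ===== CLAIM (what is proved, stated in full; the proofs are below) =====
def Claim_equal_check_fibonacci : Prop := ∀ (data : List Int), Dom_check_fibonacci data → Spec_check_fibonacci data (check_fibonacci data)

-- ===== LEMMAS AND PROOFS =====

-- proof-side canonical continuation of the Fibonacci chain after a, b
def fibChain (a b : Int) : Nat → List Int
  | 0 => []
  | k + 1 => (a + b) :: fibChain b (a + b) k

-- comparing against the generated stream from state (a+b, b+(a+b)) is equality with the canonical chain
lemma fibAll_eq_chain : ∀ (l : List Int) (a b : Int),
    (fibAll l (a + b) (b + (a + b)) = true) ↔ l = fibChain a b l.length := by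
  intro l
  induction l with
  | nil => intro a b; simp [fibAll, fibChain]
  | cons x xs ih =>
    intro a b
    simp only [fibAll, Bool.and_eq_true, beq_iff_eq, List.length_cons, fibChain, List.cons.injEq]
    exact and_congr Iff.rfl (ih b (a + b))

lemma foldl_and_eq_all (c : Int → Bool) (l : List Int) (b : Bool) :
    l.foldl (fun acc i => acc && c i) b = (b && l.all c) := by
  induction l generalizing b with
  | nil => simp
  | cons x xs ih => simp [List.foldl_cons, ih, Bool.and_assoc]

-- the recurrence-plus-nonzero condition characterises the canonical chain when 0 ≤ a < a + something
lemma chain_char : ∀ (rest : List Int) (a b : Int), 0 ≤ a → 0 < b →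
    ((∀ k : Nat, k < rest.length →
        rest.getD k 0 = (a :: b :: rest).getD k 0 + (b :: rest).getD k 0 ∧ rest.getD k 0 ≠ 0)
      ↔ rest = fibChain a b rest.length) := by
  intro rest
  induction rest with
  | nil => intro a b _ _; simp [fibChain]
  | cons x xs ih =>
    intro a b ha hb
    constructor
    · intro h
      have h0 := h 0 (by simp)
      simp at h0
      have hx : x = a + b := h0.1
      have hxs : xs = fibChain b x xs.length := by
        refine (ih b x (le_of_lt hb) (by omega)).mp ?_
        intro k hk
        have := h (k + 1) (by simp; omega)
        simpa using this
      subst hx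
      simp [fibChain, ← hxs]
    · intro h
      have hx : x = a + b := by
        simp [fibChain] at h; exact h.1
      have hxs : xs = fibChain b x xs.length := by
        simp [fibChain] at h
        rw [← hx] at h; exact h.2
      intro k hk
      cases k with
      | zero => simp [hx]; omega
      | succ j =>
        have := (ih b x (le_of_lt hb) (by omega)).mpr hxs j (by simpa using hk)
        simpa using this

-- ===== VERDICT (by name: the statement is the Claim_ definition above) =====
theorem check_fibonacci_spec : Claim_equal_check_fibonacci := by
  intro data _
  unfold Spec_check_fibonacci check_fibonacci check_fibonacci_alt
  match data with
  | [] => rfl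
  | [d0] =>
    simp [fibAll, PySem.List.pyGetD]
  | [d0, d1] =>
    simp [fibAll, PySem.List.pyGetD]
  | d0 :: d1 :: x :: rest =>
    -- reduce A to its guarded index loop
    simp only [List.length_cons]
    rw [show ((rest.length + 1 + 1 + 1 : Nat) : Int) = (rest.length : Int) + 3 by push_cast; ring]
    have h0 : (((rest.length : Int) + 3) == 0) = false := by simp; omega
    have h1 : (((rest.length : Int) + 3) == 1) = false := by simp; omega
    have h2 : (((rest.length : Int) + 3) == 2) = false := by simp; omega
    simp only [h0, h1, h2, if_false, Bool.false_eq_true]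
    -- unfold B's stream comparison over the first two elements
    have hB : (if (d0 :: d1 :: x :: rest).isEmpty = true then false
          else fibAll (d0 :: d1 :: x :: rest) 0 1)
        = (d0 == 0 && (d1 == 1 && fibAll (x :: rest) 1 2)) := by
      norm_num [fibAll]
    have hg0 : PySem.List.pyGetD (d0 :: d1 :: x :: rest) 0 0 = d0 := by simp [pysem]
    have hg1 : PySem.List.pyGetD (d0 :: d1 :: x :: rest) 1 0 = d1 := by simp [pysem]
    rw [hg0, hg1, hB]
    cases hb : (d0 == 0 && d1 == 1) with
    | true =>
      obtain ⟨hd0, hd1⟩ : d0 = 0 ∧ d1 = 1 := by simpa using hb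
      subst hd0; subst hd1
      simp only [if_true, beq_self_eq_true, Bool.true_and]
      apply Bool.coe_iff_coe.mp
      rw [foldl_and_eq_all, Bool.true_and]
      rw [show (rest.length : Int) + 3 - 2 = (((x :: rest).length : Nat) : Int) by simp; ring]
      rw [List.all_eq_true]
      rw [show fibAll (x :: rest) 1 2 = fibAll (x :: rest) (0 + 1) (1 + (0 + 1)) by norm_num]
      rw [fibAll_eq_chain (x :: rest) 0 1]
      rw [← chain_char (x :: rest) 0 1 le_rfl one_pos]
      have hcond : ∀ k : Nat,
          ((!(PySem.List.pyGetD (0 :: 1 :: x :: rest) ((k : Int) + 2) 0 !=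
                PySem.List.pyGetD (0 :: 1 :: x :: rest) (k : Int) 0 +
                  PySem.List.pyGetD (0 :: 1 :: x :: rest) ((k : Int) + 1) 0 ||
              PySem.List.pyGetD (0 :: 1 :: x :: rest) ((k : Int) + 2) 0 == 0)) = true)
          ↔ ((x :: rest).getD k 0 =
                ((0 : Int) :: 1 :: x :: rest).getD k 0 + ((1 : Int) :: x :: rest).getD k 0 ∧
              (x :: rest).getD k 0 ≠ 0) := by
        intro k
        have g0 : PySem.List.pyGetD ((0 : Int) :: 1 :: x :: rest) (k : Int) 0 =
            ((0 : Int) :: 1 :: x :: rest).getD k 0 := PySem.List.pyGetD_natCast _ k 0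
        have g1 : PySem.List.pyGetD ((0 : Int) :: 1 :: x :: rest) ((k : Int) + 1) 0 =
            ((1 : Int) :: x :: rest).getD k 0 := by
          rw [show (k : Int) + 1 = ((k + 1 : Nat) : Int) by push_cast; ring,
            PySem.List.pyGetD_natCast]
          simp [List.getD]
        have g2 : PySem.List.pyGetD ((0 : Int) :: 1 :: x :: rest) ((k : Int) + 2) 0 =
            (x :: rest).getD k 0 := by
          rw [show (k : Int) + 2 = ((k + 2 : Nat) : Int) by push_cast; ring,
            PySem.List.pyGetD_natCast]
          simp [List.getD]
        rw [g0, g1, g2]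
        simp [bne]
      constructor
      · intro h k hk
        refine (hcond k).mp (h (k : Int) ?_)
        rw [PySem.List.mem_pyRange_one]
        exact ⟨Int.natCast_nonneg k, by exact_mod_cast hk⟩
      · intro h i hi
        rw [PySem.List.mem_pyRange_one] at hi
        obtain ⟨h0i, h1i⟩ := hi
        obtain ⟨k, rfl⟩ : ∃ k : Nat, (k : Int) = i := ⟨i.toNat, Int.toNat_of_nonneg h0i⟩
        exact (hcond k).mpr (h k (by exact_mod_cast h1i))
    | false =>
      simp only [Bool.false_eq_true, if_false]
      by_cases hz : d0 = 0
      · simp [hz] at hb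
        simp [hz, hb]
      · simp [hz]
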